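-- pv_equiv track=rewrite | github.com/DavidIsSoEpic/MarsColonySimulator | building_manager.py | tiles_adjacent
-- ===== SOURCE A (Python) =====
-- def tiles_adjacent(tiles_a, tiles_b):
--     """Return True if any tile in tiles_a is adjacent (Chebyshev distance 1) to any tile in tiles_b.
--     Adjacent excludes exact overlap (dx=0,dy=0)."""
--     if not tiles_a or not tiles_b:
--         return False
--     # build a set of neighbors of tiles_b (excluding the tile itself)
--     neighbors = set()
--     for (bx, by) in tiles_b:
--         for dx in (-1, 0, 1):
--             for dy in (-1, 0, 1):
--                 if dx == 0 and dy == 0: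
--                     continue
--                 neighbors.add((bx + dx, by + dy))
--     # adjacency exists if any tile in tiles_a is in neighbors
--     return any(t in neighbors for t in tiles_a)
-- ===== SOURCE B (Python) =====
-- def tiles_adjacent(tiles_a, tiles_b):
--     """Return True if any tile in tiles_a is adjacent (Chebyshev distance 1) to any tile in tiles_b.
--     Adjacent excludes exact overlap (dx=0,dy=0)."""
--     return any(
--         (ax - bx) in (-1, 0, 1) and (ay - by) in (-1, 0, 1)
--         and not (ax == bx and ay == by)
--         for (ax, ay) in tiles_a
--         for (bx, by) in tiles_b
--     )
-- ===== Notes on version B (the rewrite author's own statement) =====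
-- stated objective: simpler
-- what changed: Replaced A's precomputed neighbor-offset set of tiles_b (8 neighbors per tile) plus membership scan by a direct any() over all pairs testing each coordinate difference against (-1,0,1); no intermediate set is built.
import Mathlib
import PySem

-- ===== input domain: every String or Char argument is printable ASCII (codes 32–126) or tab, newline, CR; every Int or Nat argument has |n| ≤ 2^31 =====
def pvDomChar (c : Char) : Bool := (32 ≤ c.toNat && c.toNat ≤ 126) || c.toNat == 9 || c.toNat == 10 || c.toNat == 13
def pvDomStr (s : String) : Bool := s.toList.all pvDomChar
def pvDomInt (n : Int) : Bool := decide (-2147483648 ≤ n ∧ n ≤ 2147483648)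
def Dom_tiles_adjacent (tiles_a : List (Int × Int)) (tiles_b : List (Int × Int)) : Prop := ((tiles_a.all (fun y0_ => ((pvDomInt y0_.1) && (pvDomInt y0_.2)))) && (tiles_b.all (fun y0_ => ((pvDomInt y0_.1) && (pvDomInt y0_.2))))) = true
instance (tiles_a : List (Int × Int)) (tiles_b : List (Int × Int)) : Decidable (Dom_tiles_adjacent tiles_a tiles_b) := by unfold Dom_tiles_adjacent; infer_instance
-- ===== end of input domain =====

-- B replaces A's precomputed neighbor set of tiles_b by a direct any() over all pairs
-- testing each coordinate difference against (-1, 0, 1); objective: simpler.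

-- ===== PORT A =====
def tiles_adjacent (tiles_a : List (Int × Int)) (tiles_b : List (Int × Int)) : Bool :=
  if tiles_a.isEmpty || tiles_b.isEmpty then false
  else
    let neighbors : PySem.Set (Int × Int) :=
      tiles_b.foldl (fun s p =>
        ([(-1 : Int), 0, 1]).foldl (fun s dx =>
          ([(-1 : Int), 0, 1]).foldl (fun s dy =>
            if dx = 0 ∧ dy = 0 then s
            else PySem.Set.add s (p.1 + dx, p.2 + dy)) s) s) PySem.Set.empty
    tiles_a.any (fun t => PySem.Set.contains neighbors t)

-- ===== PORT B =====
def tiles_adjacent_alt (tiles_a : List (Int × Int)) (tiles_b : List (Int × Int)) : Bool :=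
  tiles_a.any (fun a => tiles_b.any (fun b =>
    decide ((a.1 - b.1 = -1 ∨ a.1 - b.1 = 0 ∨ a.1 - b.1 = 1) ∧
            (a.2 - b.2 = -1 ∨ a.2 - b.2 = 0 ∨ a.2 - b.2 = 1) ∧
            ¬(a.1 = b.1 ∧ a.2 = b.2))))

-- ===== PRECONDITION & SPEC =====
def Spec_tiles_adjacent (tiles_a : List (Int × Int)) (tiles_b : List (Int × Int)) (out : Bool) : Prop := out = tiles_adjacent_alt tiles_a tiles_b
instance (tiles_a : List (Int × Int)) (tiles_b : List (Int × Int)) (out : Bool) : Decidable (Spec_tiles_adjacent tiles_a tiles_b out) := by unfold Spec_tiles_adjacent; infer_instance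

-- ===== CLAIM (what is proved, stated in full; the proofs are below) =====
def Claim_equal_tiles_adjacent : Prop := ∀ (tiles_a : List (Int × Int)) (tiles_b : List (Int × Int)), Dom_tiles_adjacent tiles_a tiles_b → Spec_tiles_adjacent tiles_a tiles_b (tiles_adjacent tiles_a tiles_b)

-- ===== LEMMAS AND PROOFS =====

-- A's inner double loop over (dx, dy), named so rewriting can treat it atomically
def stepA (s : PySem.Set (Int × Int)) (p : Int × Int) : PySem.Set (Int × Int) :=
  ([(-1 : Int), 0, 1]).foldl (fun s dx =>
    ([(-1 : Int), 0, 1]).foldl (fun s dy =>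
      if dx = 0 ∧ dy = 0 then s
      else PySem.Set.add s (p.1 + dx, p.2 + dy)) s) s

-- B's per-pair adjacency condition
def adjCond (t p : Int × Int) : Prop :=
  (t.1 - p.1 = -1 ∨ t.1 - p.1 = 0 ∨ t.1 - p.1 = 1) ∧
  (t.2 - p.2 = -1 ∨ t.2 - p.2 = 0 ∨ t.2 - p.2 = 1) ∧
  ¬(t.1 = p.1 ∧ t.2 = p.2)

theorem stepA_eq (s : PySem.Set (Int × Int)) (p : Int × Int) :
    stepA s p =
    PySem.Set.add (PySem.Set.add (PySem.Set.add (PySem.Set.add (PySem.Set.add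
      (PySem.Set.add (PySem.Set.add (PySem.Set.add s
      (p.1 + -1, p.2 + -1)) (p.1 + -1, p.2 + 0)) (p.1 + -1, p.2 + 1))
      (p.1 + 0, p.2 + -1)) (p.1 + 0, p.2 + 1))
      (p.1 + 1, p.2 + -1)) (p.1 + 1, p.2 + 0)) (p.1 + 1, p.2 + 1) := rfl

theorem mem_stepA (s : PySem.Set (Int × Int)) (p t : Int × Int) :
    t ∈ stepA s p ↔ t ∈ s ∨ adjCond t p := by
  obtain ⟨x, y⟩ := t; obtain ⟨a, b⟩ := p
  rw [stepA_eq]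
  simp only [PySem.Set.mem_add, Prod.mk.injEq, adjCond, or_assoc]
  by_cases hs : (x, y) ∈ s
  · simp [hs]
  · simp only [hs, false_or]
    omega

theorem mem_neighbors (tiles_b : List (Int × Int)) (s : PySem.Set (Int × Int)) (t : Int × Int) :
    t ∈ tiles_b.foldl stepA s ↔ t ∈ s ∨ ∃ p ∈ tiles_b, adjCond t p := by
  induction tiles_b generalizing s with
  | nil => simp
  | cons p ps ih =>
    rw [List.foldl_cons, ih, mem_stepA]
    simp only [List.mem_cons]
    constructor
    · rintro ((h | h) | ⟨q, hq, hc⟩)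
      · exact Or.inl h
      · exact Or.inr ⟨p, Or.inl rfl, h⟩
      · exact Or.inr ⟨q, Or.inr hq, hc⟩
    · rintro (h | ⟨q, (rfl | hq), hc⟩)
      · exact Or.inl (Or.inl h)
      · exact Or.inl (Or.inr hc)
      · exact Or.inr ⟨q, hq, hc⟩

-- ===== VERDICT (by name: the statement is the Claim_ definition above) =====
theorem tiles_adjacent_spec : Claim_equal_tiles_adjacent := by
  intro tiles_a tiles_b _
  unfold Spec_tiles_adjacent tiles_adjacent tiles_adjacent_alt
  rcases tiles_a with _ | ⟨t0, ta⟩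
  · simp
  rcases tiles_b with _ | ⟨q0, tb⟩
  · simp
  have hfold : ∀ (l : List (Int × Int)) (s : PySem.Set (Int × Int)),
      l.foldl (fun s p =>
        ([(-1 : Int), 0, 1]).foldl (fun s dx =>
          ([(-1 : Int), 0, 1]).foldl (fun s dy =>
            if dx = 0 ∧ dy = 0 then s
            else PySem.Set.add s (p.1 + dx, p.2 + dy)) s) s) s = l.foldl stepA s :=
    fun l s => rfl
  rw [Bool.eq_iff_iff]
  simp only [List.isEmpty_cons, Bool.or_self, Bool.false_eq_true, if_false, hfold,
    List.any_eq_true, PySem.Set.contains_iff, mem_neighbors, PySem.Set.empty,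
    List.not_mem_nil, false_or, decide_eq_true_eq, adjCond]
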